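-- pv_equiv track=rewrite | github.com/loghyr/reffs | support/compare_pjdfstest.py | find_last_summary_block
-- ===== SOURCE A (Python) =====
-- def find_last_summary_block(lines: list[str]) -> list[str]:
--     """
--     Locate the *last* 'Test Summary Report' block (the final prove run,
--     ignoring any earlier partial runs from the same session).
--     """
--     last_idx = -1
--     for i, line in enumerate(lines):
--         if line.strip() == 'Test Summary Report':
--             last_idx = i
--     if last_idx < 0:
--         return []
--     # Collect until the "Files=N, Tests=N" totals line
--     block = []
--     for line in lines[last_idx:]:
--         block.append(line)
--         if line.startswith('Files=') and 'Tests=' in line: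
--             break
--     return block
-- ===== SOURCE B (Python) =====
-- def find_last_summary_block(lines: list[str]) -> list[str]:
--     """Single forward pass: restart the block at every summary header
--     (so the last one wins) and stop collecting at the totals line."""
--     block = []
--     collecting = False
--     for line in lines:
--         if line.strip() == 'Test Summary Report':
--             block = [line]
--             collecting = True
--         elif collecting:
--             block.append(line)
--             if line.startswith('Files=') and 'Tests=' in line:
--                 collecting = False
--     return block
-- ===== Notes on version B (the rewrite author's own statement) =====
-- stated objective: simpler
-- what changed: Replaces A's two passes (enumerate to find the last header index, then re-scan a slice until the totals line) with one forward pass that restarts the block at every summary header and stops appending at the totals line.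
import Mathlib
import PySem

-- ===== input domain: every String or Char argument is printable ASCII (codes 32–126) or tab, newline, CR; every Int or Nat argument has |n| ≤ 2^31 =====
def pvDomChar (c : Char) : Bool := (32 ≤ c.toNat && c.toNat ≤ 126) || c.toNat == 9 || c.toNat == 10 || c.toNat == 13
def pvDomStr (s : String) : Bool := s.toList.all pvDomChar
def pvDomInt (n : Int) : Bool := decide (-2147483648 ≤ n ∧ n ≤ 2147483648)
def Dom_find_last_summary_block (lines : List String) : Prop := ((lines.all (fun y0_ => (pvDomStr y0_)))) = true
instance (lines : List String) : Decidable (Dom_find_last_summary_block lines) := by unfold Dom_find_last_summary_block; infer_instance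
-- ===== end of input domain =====

-- B does the same job in one forward pass instead of A's index-hunting pass plus a slice re-scan; same cost, simpler.

-- ===== PORT A =====
-- shared condition helpers (the identical Python expressions occur in both sources)
def pvIsSummary (l : String) : Bool := PySem.Str.strip l == "Test Summary Report"
def pvIsTotals (l : String) : Bool := PySem.Str.startswith l "Files=" && PySem.Str.isIn "Tests=" l

-- A's first loop: `for i, line in enumerate(lines): if line.strip() == …: last_idx = i`
def pvLastIdxA (lines : List String) : Int :=
  (PySem.List.enumerate lines 0).foldl
    (fun acc p => if pvIsSummary p.2 then p.1 else acc) (-1)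

-- A's second loop with its `break`: append, then stop on the totals line
def pvCollectA (block : List String) : List String → List String
  | [] => block
  | l :: rest => if pvIsTotals l then block ++ [l] else pvCollectA (block ++ [l]) rest

def find_last_summary_block (lines : List String) : List String :=
  let last_idx := pvLastIdxA lines
  if last_idx < 0 then []
  else pvCollectA [] (PySem.List.slice lines (some last_idx) none)

-- ===== PORT B =====
-- B's single pass: state = (block, collecting)
def pvStepB (st : List String × Bool) (l : String) : List String × Bool :=
  if pvIsSummary l then ([l], true)
  else if st.2 then (st.1 ++ [l], !pvIsTotals l)
  else st

def find_last_summary_block_alt (lines : List String) : List String :=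
  (lines.foldl pvStepB ([], false)).1

-- ===== PRECONDITION & SPEC =====
def Spec_find_last_summary_block (lines : List String) (out : List String) : Prop := out = find_last_summary_block_alt lines
instance (lines : List String) (out : List String) : Decidable (Spec_find_last_summary_block lines out) := by unfold Spec_find_last_summary_block; infer_instance

-- ===== CLAIM (what is proved, stated in full; the proofs are below) =====
def Claim_equal_find_last_summary_block : Prop := ∀ (lines : List String), Dom_find_last_summary_block lines → Spec_find_last_summary_block lines (find_last_summary_block lines)

-- ===== LEMMAS AND PROOFS =====

-- a summary header cannot also be a `Files=…` totals line
theorem pv_summary_not_totals (l : String) (h : pvIsSummary l = true) : pvIsTotals l = false := by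
  by_contra hne
  have htot : pvIsTotals l = true := by
    cases hEq : pvIsTotals l
    · exact absurd hEq hne
    · rfl
  have hstarts : PySem.Str.startswith l "Files=" = true := by
    have := htot
    unfold pvIsTotals at this
    exact (Bool.and_eq_true _ _).mp this |>.1
  have hpre : "Files=".toList <+: l.toList := by
    have : PySem.Chars.startswith l.toList "Files=".toList = true := hstarts
    exact (PySem.Chars.startswith_iff _ _).mp this
  -- so l.toList = 'F' :: rest
  obtain ⟨t, ht⟩ := hpre
  have hF : l.toList = 'F' :: ("iles=".toList ++ t) := by
    simpa using ht.symm
  -- strip l = "Test Summary Report"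
  have hstrip : PySem.Chars.strip l.toList = "Test Summary Report".toList := by
    have hs : PySem.Str.strip l = "Test Summary Report" := by
      unfold pvIsSummary at h
      exact eq_of_beq h
    have := congrArg String.toList hs
    simpa [PySem.Str.strip] using this
  -- lstrip keeps the leading 'F'
  have hls : PySem.Chars.lstrip l.toList = l.toList := by
    rw [hF]
    simp [PySem.Chars.lstrip, List.dropWhile, PySem.Chars.isspace]
  -- rstrip is a prefix of its argument
  have hrs : PySem.Chars.strip l.toList <+: l.toList := by
    unfold PySem.Chars.strip
    rw [hls]
    unfold PySem.Chars.rstrip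
    have hsuf : List.dropWhile PySem.Chars.isspace l.toList.reverse <:+ l.toList.reverse :=
      List.dropWhile_suffix _
    have h2 := List.reverse_prefix.mpr hsuf
    simpa using h2
  rw [hstrip, hF] at hrs
  obtain ⟨u, hu⟩ := hrs
  have h3 := congrArg (fun xs => xs.head?) hu
  simp at h3

-- structural decomposition over the last summary line
theorem pv_split_last (p : String → Bool) (l : List String) :
    (∀ x ∈ l, p x = false) ∨
      ∃ xs m ys, l = xs ++ m :: ys ∧ p m = true ∧ ∀ x ∈ ys, p x = false := by
  induction l using List.reverseRecOn with
  | nil => exact Or.inl (by simp)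
  | append_singleton l x ih =>
    cases hx : p x with
    | true =>
      exact Or.inr ⟨l, x, [], by simp, hx, by simp⟩
    | false =>
      rcases ih with hall | ⟨xs, m, ys, hdec, hm, hys⟩
      · refine Or.inl ?_
        intro y hy
        rcases List.mem_append.mp hy with h | h
        · exact hall y h
        · simpa [List.mem_singleton.mp h] using hx
      · refine Or.inr ⟨xs, m, ys ++ [x], by simp [hdec], hm, ?_⟩
        intro y hy
        rcases List.mem_append.mp hy with h | h
        · exact hys y h
        · simpa [List.mem_singleton.mp h] using hx

-- B's fold is frozen once collecting is off, on summary-free input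
theorem pv_fold_frozen (b : List String) (ys : List String)
    (h : ∀ x ∈ ys, pvIsSummary x = false) :
    ys.foldl pvStepB (b, false) = (b, false) := by
  induction ys with
  | nil => rfl
  | cons l rest ih =>
    have hl : pvIsSummary l = false := h l (by simp)
    have hrest : ∀ x ∈ rest, pvIsSummary x = false := fun x hx => h x (by simp [hx])
    simp [List.foldl, pvStepB, hl, ih hrest]

-- while collecting on summary-free input, B's fold IS A's collector
theorem pv_fold_collect (ys : List String) :
    ∀ b : List String, (∀ x ∈ ys, pvIsSummary x = false) →
    (ys.foldl pvStepB (b, true)).1 = pvCollectA b ys := by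
  induction ys with
  | nil => intro b _; rfl
  | cons l rest ih =>
    intro b h
    have hl : pvIsSummary l = false := h l (by simp)
    have hrest : ∀ x ∈ rest, pvIsSummary x = false := fun x hx => h x (by simp [hx])
    cases ht : pvIsTotals l with
    | true =>
      simp [List.foldl, pvStepB, hl, ht, pvCollectA, pv_fold_frozen (b ++ [l]) rest hrest]
    | false =>
      simp [List.foldl, pvStepB, hl, ht, pvCollectA, ih (b ++ [l]) hrest]

-- A's last-index loop on summary-free input returns the accumulator
theorem pv_lastidx_frozen (ys : List String) :
    ∀ (s acc : Int), (∀ x ∈ ys, pvIsSummary x = false) →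
    (PySem.List.enumerate ys s).foldl
      (fun acc p => if pvIsSummary p.2 then p.1 else acc) acc = acc := by
  induction ys with
  | nil => intro s acc _; rfl
  | cons l rest ih =>
    intro s acc h
    have hl : pvIsSummary l = false := h l (by simp)
    have hrest : ∀ x ∈ rest, pvIsSummary x = false := fun x hx => h x (by simp [hx])
    rw [PySem.List.enumerate_cons]
    simp [List.foldl, hl, ih (s + 1) acc hrest]

-- A's last index on the decomposition is the header's position
theorem pv_lastidx_split (xs : List String) (m : String) (ys : List String)
    (hm : pvIsSummary m = true) (hys : ∀ x ∈ ys, pvIsSummary x = false) :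
    pvLastIdxA (xs ++ m :: ys) = (xs.length : Int) := by
  unfold pvLastIdxA
  rw [PySem.List.enumerate_append, List.foldl_append, PySem.List.enumerate_cons]
  simp only [List.foldl_cons, hm, if_pos]
  rw [pv_lastidx_frozen ys _ _ hys]
  simp

-- ===== VERDICT (by name: the statement is the Claim_ definition above) =====
theorem find_last_summary_block_spec : Claim_equal_find_last_summary_block := by
  intro lines _
  unfold Spec_find_last_summary_block
  rcases pv_split_last pvIsSummary lines with hall | ⟨xs, m, ys, hdec, hm, hys⟩
  · -- no summary header at all: both return []
    have hidx : pvLastIdxA lines = -1 := by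
      unfold pvLastIdxA
      exact pv_lastidx_frozen lines 0 (-1) hall
    have hb : find_last_summary_block_alt lines = [] := by
      unfold find_last_summary_block_alt
      rw [pv_fold_frozen [] lines hall]
    rw [hb]
    unfold find_last_summary_block
    simp [hidx]
  · subst hdec
    have hidx : pvLastIdxA (xs ++ m :: ys) = (xs.length : Int) := pv_lastidx_split xs m ys hm hys
    have hnot : ¬ ((xs.length : Int) < 0) := not_lt.mpr (Int.natCast_nonneg _)
    have hslice : PySem.List.slice (xs ++ m :: ys) (some (xs.length : Int)) none = m :: ys := by
      rw [PySem.List.slice_from _ (Int.natCast_nonneg _)]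
      have h4 : List.drop xs.length (xs ++ m :: ys) = m :: ys := List.drop_left
      simp [h4]
    have hA : find_last_summary_block (xs ++ m :: ys) = pvCollectA [m] ys := by
      unfold find_last_summary_block
      rw [hidx]
      simp only [hnot, if_false]
      rw [hslice]
      simp [pvCollectA, pv_summary_not_totals m hm]
    have hB : find_last_summary_block_alt (xs ++ m :: ys) = pvCollectA [m] ys := by
      unfold find_last_summary_block_alt
      rw [List.foldl_append]
      have hstep : pvStepB (xs.foldl pvStepB ([], false)) m = ([m], true) := by
        simp [pvStepB, hm]
      simp only [List.foldl_cons, hstep]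
      exact pv_fold_collect ys [m] hys
    rw [hA, hB]
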